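-- pv_equiv track=rewrite | github.com/nikita-kostylev/federated-est-miner | securitymetrics.py | activity_delta
-- ===== SOURCE A (Python) =====
-- def activity_delta(alidict):
--     blidict = {}
--     for key in alidict:
--         list = alidict[key]
--         keydeltalist = []
--         for trace in list:
--             i,j = 0,0
--             direct = False
--             deltalist = []
--             while j<len(trace)-1 and i<len(key):
--                 if key[i]==trace[j]['concept:name']:
--                     i += 1
--                     j += 1
--                     if direct==True and i>1:
--                         deltalist.append(0)
--                     elif i>1:
--                         deltalist.append(1)
--                     direct = True
--                 else:
--                     j += 1
--                     direct = False
--             keydeltalist.append(deltalist)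
--         blidict[key]=keydeltalist
--     return blidict
-- ===== SOURCE B (Python) =====
-- def _trace_deltas(key, trace):
--     # Phase 1: greedy subsequence match, collecting matched trace positions only.
--     positions = []
--     i, j = 0, 0
--     while j < len(trace) - 1 and i < len(key):
--         if key[i] == trace[j]['concept:name']:
--             positions.append(j)
--             i += 1
--         j += 1
--     # Phase 2: deltas between consecutive matched positions (0 = adjacent, 1 = gap).
--     return [0 if q == p + 1 else 1 for p, q in zip(positions, positions[1:])]
--
--
-- def activity_delta(alidict):
--     return {key: [_trace_deltas(key, trace) for trace in traces]
--             for key, traces in alidict.items()}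
-- ===== Notes on version B (the rewrite author's own statement) =====
-- stated objective: alternative
-- what changed: B replaces A's in-loop delta emission driven by the mutable 'direct' flag and the 'i>1' first-match test with two separate phases: a greedy match that only collects the matched trace positions, then a zip pass over consecutive positions emitting 0 for adjacent matches and 1 for gapped ones; Pre_ excludes exactly the inputs where both A and B raise KeyError (an event dict missing 'concept:name' that the scan actually reaches).
import Mathlib
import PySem

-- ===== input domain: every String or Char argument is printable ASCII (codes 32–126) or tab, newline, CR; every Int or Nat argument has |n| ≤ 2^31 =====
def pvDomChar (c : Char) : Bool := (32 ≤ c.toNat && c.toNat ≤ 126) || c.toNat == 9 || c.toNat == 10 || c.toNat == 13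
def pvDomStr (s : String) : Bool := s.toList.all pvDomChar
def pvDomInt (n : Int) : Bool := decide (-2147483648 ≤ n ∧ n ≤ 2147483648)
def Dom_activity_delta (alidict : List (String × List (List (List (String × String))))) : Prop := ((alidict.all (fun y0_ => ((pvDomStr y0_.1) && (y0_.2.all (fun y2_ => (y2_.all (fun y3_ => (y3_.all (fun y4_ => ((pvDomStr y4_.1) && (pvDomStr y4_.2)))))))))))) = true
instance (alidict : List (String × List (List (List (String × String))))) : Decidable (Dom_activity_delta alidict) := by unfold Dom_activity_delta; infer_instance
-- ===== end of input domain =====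

-- B computes each trace's deltas in two phases (collect the matched positions, then diff
-- adjacent positions) instead of A's in-loop emission driven by the 'direct' flag; same cost.

-- ===== PORT A =====
-- A's inner while loop: two pointers i (key) / j (trace), a 'direct' flag, deltas appended
-- inside the loop. trace[j]['concept:name'] is a Python dict lookup, modelled by
-- PySem.Dict.ofList + get? (duplicate event keys overwrite, as in Python); a missing
-- 'concept:name' raises KeyError in Python (those inputs are excluded by Pre_) — here the
-- comparison with none simply fails, taking the mismatch branch.
def adLoop (kl : List Char) (trace : List (List (String × String))) (i j : Nat) (direct : Bool) (deltalist : List Int) : List Int :=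
  if h : j + 1 < trace.length ∧ i < kl.length then
    if some (String.ofList [kl.getD i ' ']) = (PySem.Dict.ofList (trace.getD j [])).get? "concept:name" then
      adLoop kl trace (i + 1) (j + 1) true
        (if direct = true ∧ 1 < i + 1 then deltalist ++ [(0 : Int)]
         else if 1 < i + 1 then deltalist ++ [(1 : Int)]
         else deltalist)
    else adLoop kl trace i (j + 1) false deltalist
  else deltalist
termination_by trace.length - j
decreasing_by all_goals omega

def activity_delta (alidict : List (String × List (List (List (String × String))))) : List (String × List (List Int)) :=
  let d := PySem.Dict.ofList alidict
  let blidict := d.items.foldl (fun blidict kv =>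
      let keydeltalist := kv.2.foldl (fun acc trace => acc ++ [adLoop kv.1.toList trace 0 0 false []]) []
      blidict.insert kv.1 keydeltalist) PySem.Dict.empty
  blidict.items

-- ===== PORT B =====
-- Phase 1: the greedy two-pointer scan, collecting only the matched trace positions.
def bdCollect (kl : List Char) (trace : List (List (String × String))) (i j : Nat) : List Nat :=
  if h : j + 1 < trace.length ∧ i < kl.length then
    if some (String.ofList [kl.getD i ' ']) = (PySem.Dict.ofList (trace.getD j [])).get? "concept:name" then
      j :: bdCollect kl trace (i + 1) (j + 1)
    else bdCollect kl trace i (j + 1)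
  else []
termination_by trace.length - j
decreasing_by all_goals omega

-- Phase 2: zip over consecutive matched positions: 0 if adjacent, else 1.
def bdTraceDeltas (key : String) (trace : List (List (String × String))) : List Int :=
  let positions := bdCollect key.toList trace 0 0
  List.zipWith (fun p q => if q = p + 1 then (0 : Int) else 1) positions positions.tail

def activity_delta_alt (alidict : List (String × List (List (List (String × String))))) : List (String × List (List Int)) :=
  (PySem.Dict.ofList alidict).items.map (fun kv => (kv.1, kv.2.map (fun trace => bdTraceDeltas kv.1 trace)))

-- ===== PRECONDITION & SPEC =====
-- Pre_ excludes EXACTLY the inputs on which A (and B alike) raises KeyError: the scan reads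
-- trace[j]['concept:name'] at every position j it reaches; it reaches the first event missing
-- that key (at index j < len(trace)-1) iff the key was not already fully matched inside the
-- earlier events, i.e. iff the key's characters (as singleton strings) do not form a
-- subsequence of the names of the first j events (greedy matching is optimal for subsequence
-- containment). On every input Pre_ admits, A returns normally.
def Pre_activity_delta (alidict : List (String × List (List (List (String × String))))) : Prop :=
  ((PySem.Dict.ofList alidict).items.all (fun p => p.2.all (fun trace =>
     let names := trace.map (fun e => (PySem.Dict.ofList e).get? "concept:name")
     match names.findIdx? Option.isNone with
     | none => true
     | some j => decide (trace.length - 1 ≤ j) ||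
         (p.1.toList.map (fun c => some (String.ofList [c]))).isSublist (names.take j)))) = true
instance (alidict : List (String × List (List (List (String × String))))) : Decidable (Pre_activity_delta alidict) := by unfold Pre_activity_delta; infer_instance

def pvWitness_activity_delta : (List (String × List (List (List (String × String))))) :=
  [("a", [[[("concept:name", "a")], [("concept:name", "b")]]])]

def Spec_activity_delta (alidict : List (String × List (List (List (String × String))))) (out : List (String × List (List Int))) : Prop := out = activity_delta_alt alidict
instance (alidict : List (String × List (List (List (String × String))))) (out : List (String × List (List Int))) : Decidable (Spec_activity_delta alidict out) := by unfold Spec_activity_delta; infer_instance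

-- ===== CLAIM (what is proved, stated in full; the proofs are below) =====
def Claim_equal_activity_delta : Prop := ∀ (alidict : List (String × List (List (List (String × String))))), Dom_activity_delta alidict → Pre_activity_delta alidict → Spec_activity_delta alidict (activity_delta alidict)

-- ===== LEMMAS AND PROOFS =====

-- every position collected from state (i, j) is ≥ j
lemma bdCollect_ge (kl : List Char) (trace : List (List (String × String))) (i j : Nat) :
    ∀ p ∈ bdCollect kl trace i j, j ≤ p := by
  induction i, j using bdCollect.induct kl trace with
  | case1 i j h heq ih =>
    intro p hp
    rw [bdCollect, dif_pos h, if_pos heq] at hp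
    rw [List.mem_cons] at hp
    rcases hp with rfl | hp
    · omega
    · exact le_trans (by omega) (ih p hp)
  | case2 i j h heq ih =>
    intro p hp
    rw [bdCollect, dif_pos h, if_neg heq] at hp
    exact le_trans (by omega) (ih p hp)
  | case3 i j h =>
    intro p hp
    rw [bdCollect, dif_neg h] at hp
    simp at hp

-- A's loop output from any state, characterised by B's collected positions: the first match
-- reached from (i, j, direct) emits a delta only when i ≥ 1 (0 iff it is at j with direct
-- set), and later matches emit 0 exactly when consecutive positions are adjacent.
lemma adLoop_eq_collect (kl : List Char) (trace : List (List (String × String)))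
    (i j : Nat) (direct : Bool) (acc : List Int) :
    adLoop kl trace i j direct acc =
      acc ++ (match bdCollect kl trace i j with
        | [] => []
        | p :: rest =>
          (if 1 ≤ i then [if p = j ∧ direct = true then (0 : Int) else 1] else []) ++
          List.zipWith (fun p q => if q = p + 1 then (0 : Int) else 1) (p :: rest) rest) := by
  induction i, j, direct, acc using adLoop.induct kl trace with
  | case1 i j direct acc h heq ih =>
    rw [adLoop, dif_pos h, if_pos heq]
    rw [bdCollect, dif_pos h, if_pos heq]
    simp only [dite_eq_ite] at ih
    rw [ih]
    cases bdCollect kl trace (i + 1) (j + 1) with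
    | nil =>
      rcases Nat.eq_zero_or_pos i with rfl | hi
      · simp
      · by_cases hd : direct = true <;> simp [hd, hi, Nat.one_le_iff_ne_zero] <;> omega
    | cons p rest =>
      simp only [List.zipWith_cons_cons]
      rcases Nat.eq_zero_or_pos i with rfl | hi
      · by_cases hp : p = j + 1 <;> simp [hp]
      · have h2 : 1 < i + 1 := by omega
        have h3 : 1 ≤ i := hi
        cases direct <;> by_cases hp : p = j + 1 <;>
          simp [hp, h2, h3, List.append_assoc]
  | case2 i j direct acc h heq ih =>
    rw [adLoop, dif_pos h, if_neg heq]
    rw [bdCollect, dif_pos h, if_neg heq]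
    rw [ih]
    cases hc : bdCollect kl trace i (j + 1) with
    | nil => simp
    | cons p rest =>
      have hge : j + 1 ≤ p := bdCollect_ge kl trace i (j+1) p (by rw [hc]; exact List.mem_cons_self)
      have hp : p ≠ j := by omega
      simp [hp]
  | case3 i j direct acc h =>
    rw [adLoop, dif_neg h, bdCollect, dif_neg h]
    simp

-- from the initial state (0, 0, false) the two per-trace computations agree
lemma adLoop_eq_bdTraceDeltas (key : String) (trace : List (List (String × String))) :
    adLoop key.toList trace 0 0 false [] = bdTraceDeltas key trace := by
  rw [adLoop_eq_collect, bdTraceDeltas]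
  cases bdCollect key.toList trace 0 0 with
  | nil => simp
  | cons p rest => simp

-- ===== VERDICT (by name: the statement is the Claim_ definition above) =====
theorem activity_delta_spec : Claim_equal_activity_delta := by
  unfold Claim_equal_activity_delta Spec_activity_delta
  intro alidict _ _
  unfold activity_delta activity_delta_alt
  rw [PySem.Dict.items_foldl_insert_fresh]
  · simp only [PySem.List.foldl_append_singleton_eq_map, List.nil_append]
    apply List.map_congr_left
    intro kv _
    congr 1
    apply List.map_congr_left
    intro trace _
    exact adLoop_eq_bdTraceDeltas kv.1 trace
  · intro a _; simp [PySem.Dict.contains_empty]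
  · exact PySem.Dict.nodup_keys_ofList alidict
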